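-- pv_equiv track=rewrite | github.com/arefrazavi/rf_problem_solving | python/dynamic_programming/extremum_permutations/extremum_permutations.py | extremumPermutations
-- ===== SOURCE A (Python) =====
-- def convert_constraint_list_to_dic(constraint_list):
--     constraint_dict = {}
--     for i in constraint_list:
--         constraint_dict[i] = 1
--
--     return constraint_dict
--
-- def extremumPermutations(n, a, b):
--     a_dict = convert_constraint_list_to_dic(a)
--     b_dict = convert_constraint_list_to_dic(b)
--     # pprint(a_dict)
--     # pprint(b_dict)
--     perm_count = {1: {1: 1}}
--     sum_count = {1: 1}
--     for i in range(2, n + 1):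
--         perm_count[i] = {}
--         sum_count[i] = 0
--         j = i
--         if (a_dict.get(i) and b_dict.get(i)) or (a_dict.get(i) and a_dict.get(i-1)) or (b_dict.get(i) and b_dict.get(i-1)):
--             return 0
--         while j > 0:
--             perm_count[i][j] = 0
--             if a_dict.get(i) or b_dict.get(i - 1):
--                 if i > j:
--                     if perm_count[i - 1][j] == perm_count[i - 1][i-1]:
--                         perm_count[i][j] = ((i - j) * perm_count[i - 1][j]) % 1000000007
--                     else:
--                         for k in range(j, i):
--                             perm_count[i][j] += perm_count[i - 1][k]
--             elif a_dict.get(i - 1) or b_dict.get(i):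
--                 if j > 1:
--                     if perm_count[i - 1][1] == perm_count[i - 1][j-1]:
--                         perm_count[i][j] = ((j - 1) * perm_count[i - 1][1]) % 1000000007
--                     else:
--                         for k in range(1, j):
--                             perm_count[i][j] += perm_count[i - 1][k]
--             else:
--                 perm_count[i][j] = sum_count[i - 1] % 1000000007
--             sum_count[i] += perm_count[i][j]
--             j -= 1
--
--     return sum_count[n] % 1000000007
-- ===== SOURCE B (Python) =====
-- def extremumPermutations(n, a, b):
--     MOD = 1000000007
--     a_set, b_set = set(a), set(b)
--     # row[j] = number of valid arrangements of 1..i whose last element has rank j; row[0] unused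
--     row = [0, 1]
--     for i in range(2, n + 1):
--         if (i in a_set and i in b_set) or (i in a_set and (i - 1) in a_set) \
--                 or (i in b_set and (i - 1) in b_set):
--             return 0
--         # raw prefix sums of the previous row: pref[t] = row[1] + ... + row[t]
--         pref = [0] * i
--         for j in range(1, i):
--             pref[j] = pref[j - 1] + row[j]
--         new = [0] * (i + 1)
--         if i in a_set or (i - 1) in b_set:
--             for j in range(1, i):
--                 if row[j] == row[i - 1]:
--                     new[j] = ((i - j) * row[j]) % MOD
--                 else:
--                     new[j] = pref[i - 1] - pref[j - 1]
--         elif (i - 1) in a_set or i in b_set: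
--             for j in range(2, i + 1):
--                 if row[1] == row[j - 1]:
--                     new[j] = ((j - 1) * row[1]) % MOD
--                 else:
--                     new[j] = pref[j - 1]
--         else:
--             s = pref[i - 1] % MOD
--             for j in range(1, i + 1):
--                 new[j] = s
--         row = new
--     return sum(row) % MOD
-- ===== Notes on version B (the rewrite author's own statement) =====
-- stated objective: alternative
-- what changed: Replaces the dict-of-dicts DP whose inner per-cell loops re-sum ranges of the previous row by a flat rolling list plus one raw prefix-sum array that answers each range sum with a single subtraction (A's equal-endpoints fast path is kept, since it changes the stored value where it fires); intended as faster (O(n^2) vs worst-case O(n^3)), measured 6.28x at the largest size both finished but not confirmed by the timing gate.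
import Mathlib
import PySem

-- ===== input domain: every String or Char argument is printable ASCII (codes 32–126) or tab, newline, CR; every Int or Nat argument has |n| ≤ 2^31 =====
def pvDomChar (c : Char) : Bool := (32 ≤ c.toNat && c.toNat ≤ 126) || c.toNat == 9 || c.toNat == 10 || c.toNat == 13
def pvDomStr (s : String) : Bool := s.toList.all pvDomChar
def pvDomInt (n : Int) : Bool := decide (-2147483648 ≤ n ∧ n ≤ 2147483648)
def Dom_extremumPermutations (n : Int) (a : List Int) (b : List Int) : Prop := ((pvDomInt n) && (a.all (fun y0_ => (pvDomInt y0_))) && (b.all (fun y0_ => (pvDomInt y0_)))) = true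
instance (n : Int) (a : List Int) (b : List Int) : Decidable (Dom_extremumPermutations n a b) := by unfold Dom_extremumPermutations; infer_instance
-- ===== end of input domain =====

-- B replaces A's dict-of-dicts DP, whose inner loops re-sum ranges of the previous row, by a
-- flat list row with one raw prefix-sum array answering each range sum in O(1) (it keeps A's
-- equal-endpoints fast path, which reduces the stored value where it fires); equal return values.

def pvP : Int := 1000000007

-- ===== PORT A =====
def pvToDict (l : List Int) : PySem.Dict Int Int :=
  l.foldl (fun d i => PySem.Dict.insert d i 1) PySem.Dict.empty

-- truthiness of a_dict.get(i): every stored value is 1 (truthy), so key presence is exact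
def pvHas (d : PySem.Dict Int Int) (k : Int) : Bool := (PySem.Dict.get? d k).isSome

-- perm_count[i] / perm_count[i-1][j] / sum_count[i-1]: the keys are always present where read,
-- so .getD with a default is exact here
def pvRow (p : PySem.Dict Int (PySem.Dict Int Int)) (i : Int) : PySem.Dict Int Int :=
  (PySem.Dict.get? p i).getD PySem.Dict.empty

def pvGet (d : PySem.Dict Int Int) (j : Int) : Int := (PySem.Dict.get? d j).getD 0

-- body of A's while-loop: the final value of perm_count[i][j]
def pvEntryA (ca cb : Bool) (i : Int) (f : Int → Int) (sPrev : Int) (j : Int) : Int :=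
  if ca then
    (if i > j then
      (if f j = f (i-1) then PySem.Int.mod ((i - j) * f j) pvP
       else (PySem.List.pyRange j i 1).foldl (fun s k => s + f k) 0)
     else 0)
  else if cb then
    (if j > 1 then
      (if f 1 = f (j-1) then PySem.Int.mod ((j - 1) * f 1) pvP
       else (PySem.List.pyRange 1 j 1).foldl (fun s k => s + f k) 0)
     else 0)
  else PySem.Int.mod sPrev pvP

-- the `while j > 0` loop: builds row i and sum_count[i]
def pvWhileA (ca cb : Bool) (i : Int) (f : Int → Int) (sPrev : Int) :
    Int → Nat → PySem.Dict Int Int → Int → PySem.Dict Int Int × Int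
  | _, 0, r, si => (r, si)
  | j, fuel+1, r, si =>
    if j > 0 then
      pvWhileA ca cb i f sPrev (j - 1) fuel
        (PySem.Dict.insert r j (pvEntryA ca cb i f sPrev j)) (si + pvEntryA ca cb i f sPrev j)
    else (r, si)

-- for i in range(2, n+1), with the early `return 0`
def pvForA (aD bD : PySem.Dict Int Int) :
    Int → Nat → PySem.Dict Int (PySem.Dict Int Int) → PySem.Dict Int Int →
    Option (PySem.Dict Int (PySem.Dict Int Int) × PySem.Dict Int Int)
  | _, 0, perm, sc => some (perm, sc)
  | i, fuel+1, perm, sc =>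
    let perm1 := PySem.Dict.insert perm i PySem.Dict.empty
    let sc1 := PySem.Dict.insert sc i 0
    if (pvHas aD i && pvHas bD i) || (pvHas aD i && pvHas aD (i-1)) ||
       (pvHas bD i && pvHas bD (i-1)) then
      none
    else
      let res := pvWhileA (pvHas aD i || pvHas bD (i-1)) (pvHas aD (i-1) || pvHas bD i) i
        (fun j => pvGet (pvRow perm1 (i-1)) j) (pvGet sc1 (i-1)) i i.toNat PySem.Dict.empty 0
      pvForA aD bD (i+1) fuel (PySem.Dict.insert perm1 i res.1) (PySem.Dict.insert sc1 i res.2)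

def extremumPermutations (n : Int) (a : List Int) (b : List Int) : Int :=
  let aD := pvToDict a
  let bD := pvToDict b
  let perm0 := PySem.Dict.insert PySem.Dict.empty 1 (PySem.Dict.insert PySem.Dict.empty 1 1)
  let sc0 := PySem.Dict.insert PySem.Dict.empty 1 1
  match pvForA aD bD 2 (n - 1).toNat perm0 sc0 with
  | none => 0
  | some (_, sc) => PySem.Int.mod (pvGet sc n) pvP

-- ===== PORT B =====
def pvMOD : Int := 1000000007

-- pref[0]=0; pref[j] = pref[j-1] + row[j] for j in 1..i-1 (raw, no mod)
def pvPrefB (row : List Int) (i : Int) : List Int :=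
  (PySem.List.pyRange 1 i 1).foldl
    (fun p j => p ++ [PySem.List.pyGetD p (j-1) 0 + PySem.List.pyGetD row j 0])
    [0]

def pvLoopB (aS bS : List Int) : Int → Nat → List Int → Option (List Int)
  | _, 0, row => some row
  | i, fuel+1, row =>
    if (PySem.Set.contains aS i && PySem.Set.contains bS i) ||
       (PySem.Set.contains aS i && PySem.Set.contains aS (i-1)) ||
       (PySem.Set.contains bS i && PySem.Set.contains bS (i-1)) then none
    else
      let pref := pvPrefB row i
      let row' :=
        if PySem.Set.contains aS i || PySem.Set.contains bS (i-1) then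
          [0] ++ (PySem.List.pyRange 1 i 1).map
            (fun j => if PySem.List.pyGetD row j 0 = PySem.List.pyGetD row (i-1) 0 then
                PySem.Int.mod ((i - j) * PySem.List.pyGetD row j 0) pvMOD
              else PySem.List.pyGetD pref (i-1) 0 - PySem.List.pyGetD pref (j-1) 0) ++ [0]
        else if PySem.Set.contains aS (i-1) || PySem.Set.contains bS i then
          [0, 0] ++ (PySem.List.pyRange 2 (i+1) 1).map
            (fun j => if PySem.List.pyGetD row 1 0 = PySem.List.pyGetD row (j-1) 0 then
                PySem.Int.mod ((j - 1) * PySem.List.pyGetD row 1 0) pvMOD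
              else PySem.List.pyGetD pref (j-1) 0)
        else
          [0] ++ List.replicate i.toNat (PySem.Int.mod (PySem.List.pyGetD pref (i-1) 0) pvMOD)
      pvLoopB aS bS (i+1) fuel row'

def extremumPermutations_alt (n : Int) (a : List Int) (b : List Int) : Int :=
  let aS := PySem.Set.ofList a
  let bS := PySem.Set.ofList b
  match pvLoopB aS bS 2 (n - 1).toNat [0, 1] with
  | none => 0
  | some row => PySem.Int.mod row.sum pvMOD

-- ===== PRECONDITION & SPEC =====
-- Pre_ excludes only n < 1, on which A raises KeyError (sum_count[n] is never created).
def Pre_extremumPermutations (n : Int) (a : List Int) (b : List Int) : Prop := 1 ≤ n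
instance (n : Int) (a : List Int) (b : List Int) : Decidable (Pre_extremumPermutations n a b) := by
  unfold Pre_extremumPermutations; infer_instance

def pvWitness_extremumPermutations : Int × List Int × List Int := (3, [2], [3])

def Spec_extremumPermutations (n : Int) (a : List Int) (b : List Int) (out : Int) : Prop :=
  out = extremumPermutations_alt n a b
instance (n : Int) (a : List Int) (b : List Int) (out : Int) :
    Decidable (Spec_extremumPermutations n a b out) := by
  unfold Spec_extremumPermutations; infer_instance

-- ===== CLAIM (what is proved, stated in full; the proofs are below) =====
def Claim_equal_extremumPermutations : Prop :=
  ∀ (n : Int) (a : List Int) (b : List Int), Dom_extremumPermutations n a b →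
    Pre_extremumPermutations n a b →
    Spec_extremumPermutations n a b (extremumPermutations n a b)

-- ===== LEMMAS AND PROOFS =====

-- sum of f over the integer interval [a, b)
def pvSumI (f : Int → Int) (a b : Int) : Int := ((PySem.List.pyRange a b 1).map f).sum

theorem pvSumI_nil (f : Int → Int) (a b : Int) (h : b ≤ a) : pvSumI f a b = 0 := by
  simp [pvSumI, PySem.List.pyRange_one_eq_nil h]

theorem pvSumI_cons (f : Int → Int) (a b : Int) (h : a < b) :
    pvSumI f a b = f a + pvSumI f (a+1) b := by
  simp [pvSumI, PySem.List.pyRange_one_cons h]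

theorem pvSumI_snoc (f : Int → Int) (a b : Int) (h : a < b) :
    pvSumI f a b = pvSumI f a (b-1) + f (b-1) := by
  unfold pvSumI
  rw [show PySem.List.pyRange a b 1 = PySem.List.pyRange a (b-1) 1 ++ [b-1] from by
    conv_lhs => rw [show b = (b-1)+1 by omega]
    exact PySem.List.pyRange_one_succ_right (by omega)]
  simp

theorem pvSumI_split (f : Int → Int) (a c b : Int) (h1 : a ≤ c) (h2 : c ≤ b) :
    pvSumI f a b = pvSumI f a c + pvSumI f c b := by
  unfold pvSumI
  rw [PySem.List.pyRange_one_append a c b h1 h2]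
  simp

-- pvEntryA in each branch, as a clean formula
theorem pvEntryA_CA (cb : Bool) (i : Int) (f : Int → Int) (s j : Int) :
    pvEntryA true cb i f s j =
      (if j < i then
        (if f j = f (i-1) then PySem.Int.mod ((i - j) * f j) pvP
         else pvSumI f j i)
       else 0) := by
  simp [pvEntryA, pvSumI, PySem.List.foldl_add, gt_iff_lt]

theorem pvEntryA_CB (i : Int) (f : Int → Int) (s j : Int) :
    pvEntryA false true i f s j =
      (if 1 < j then
        (if f 1 = f (j-1) then PySem.Int.mod ((j - 1) * f 1) pvP
         else pvSumI f 1 j)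
       else 0) := by
  simp [pvEntryA, pvSumI, PySem.List.foldl_add, gt_iff_lt]

theorem pvEntryA_F (i : Int) (f : Int → Int) (s j : Int) :
    pvEntryA false false i f s j = PySem.Int.mod s pvP := by
  simp [pvEntryA]

theorem pvEntryA_CA_top (cb : Bool) (i : Int) (f : Int → Int) (s : Int) :
    pvEntryA true cb i f s i = 0 := by
  rw [pvEntryA_CA]; simp

-- dict lookup after an insert
theorem pvGet_insert (r : PySem.Dict Int Int) (k v q : Int) :
    pvGet (PySem.Dict.insert r k v) q = if q = k then v else pvGet r q := by
  unfold pvGet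
  rw [PySem.Dict.get?_insert]
  split_ifs <;> rfl

-- the while-loop's accumulated sum
theorem pvWhileA_snd (ca cb : Bool) (i : Int) (f : Int → Int) (s : Int) :
    ∀ (fuel : Nat) (j : Int) (r : PySem.Dict Int Int) (si : Int), j.toNat ≤ fuel →
    (pvWhileA ca cb i f s j fuel r si).2 = si + pvSumI (pvEntryA ca cb i f s) 1 (j+1) := by
  intro fuel
  induction fuel with
  | zero =>
    intro j r si h
    rw [pvSumI_nil _ _ _ (by omega)]
    simp [pvWhileA]
  | succ fuel ih =>
    intro j r si h
    simp only [pvWhileA]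
    by_cases hj : j > 0
    · rw [if_pos hj, ih (j-1) _ _ (by omega),
        pvSumI_snoc (pvEntryA ca cb i f s) 1 (j+1) (by omega),
        show j + 1 - 1 = j by omega]
      ring
    · rw [if_neg hj, pvSumI_nil _ _ _ (by omega)]
      simp

-- the while-loop's row entries
theorem pvWhileA_get (ca cb : Bool) (i : Int) (f : Int → Int) (s : Int) :
    ∀ (fuel : Nat) (j : Int) (r : PySem.Dict Int Int) (si : Int) (q : Int), j.toNat ≤ fuel →
    pvGet (pvWhileA ca cb i f s j fuel r si).1 q =
      if 1 ≤ q ∧ q ≤ j then pvEntryA ca cb i f s q else pvGet r q := by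
  intro fuel
  induction fuel with
  | zero =>
    intro j r si q h
    rw [if_neg (by omega)]
    simp [pvWhileA]
  | succ fuel ih =>
    intro j r si q h
    simp only [pvWhileA]
    by_cases hj : j > 0
    · rw [if_pos hj, ih (j-1) _ _ q (by omega), pvGet_insert]
      by_cases h1 : 1 ≤ q ∧ q ≤ j - 1
      · rw [if_pos h1, if_pos (by omega)]
      · rw [if_neg h1]
        by_cases h2 : q = j
        · rw [if_pos h2, if_pos (by omega), h2]
        · rw [if_neg h2, if_neg (by omega)]
    · rw [if_neg hj, if_neg (by omega)]

theorem pvMOD_eq : pvMOD = pvP := rfl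

-- reading B's row list (0-headed) at position 1 ≤ j < i
theorem pvRowB_get (g : Int → Int) (i j : Int) (hj1 : 1 ≤ j) (hji : j < i) :
    PySem.List.pyGetD (0 :: (PySem.List.pyRange 1 i 1).map g) j 0 = g j := by
  rw [PySem.List.pyGetD_of_nonneg _ _ (by omega), show j.toNat = (j-1).toNat + 1 by omega,
    List.getD_cons_succ]
  have hk := PySem.List.pyGetD_map_pyRange_one g 1 i ((j-1).toNat) 0 (by omega)
  rw [PySem.List.pyGetD_of_nonneg _ _ (by positivity), Int.toNat_natCast] at hk
  rw [hk, show 1 + ((j-1).toNat : Int) = j by omega]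

theorem pvRowB_sum (g : Int → Int) (i : Int) :
    (0 :: (PySem.List.pyRange 1 i 1).map g).sum = pvSumI g 1 i := by
  simp [pvSumI]

-- the prefix-sum list holds the raw partial sums
theorem pvPrefB_spec (row : List Int) (i : Int) (g : Int → Int) (hi : 1 ≤ i)
    (hrow : ∀ j, 1 ≤ j → j < i → PySem.List.pyGetD row j 0 = g j) :
    pvPrefB row i = (PySem.List.pyRange 0 i 1).map (fun t => pvSumI g 1 (t+1)) := by
  induction hn : (i-1).toNat generalizing i with
  | zero =>
    have hi1 : i = 1 := by omega
    subst hi1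
    unfold pvPrefB
    rw [PySem.List.pyRange_one_eq_nil le_rfl,
      show PySem.List.pyRange 0 1 1 = [0] from by decide]
    simp only [List.foldl_nil, List.map_cons, List.map_nil]
    rw [pvSumI_nil g 1 (0+1) (by omega)]
  | succ m ih =>
    have h2 : 2 ≤ i := by omega
    unfold pvPrefB
    rw [show PySem.List.pyRange 1 i 1 = PySem.List.pyRange 1 (i-1) 1 ++ [i-1] from by
        conv_lhs => rw [show i = (i-1)+1 by omega]
        exact PySem.List.pyRange_one_succ_right (by omega),
      List.foldl_append]
    have hprev := ih (i-1) (by omega) (fun j a b => hrow j a (by omega)) (by omega)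
    unfold pvPrefB at hprev
    rw [hprev]
    simp only [List.foldl_cons, List.foldl_nil]
    have hacc : PySem.List.pyGetD
        ((PySem.List.pyRange 0 (i-1) 1).map (fun t => pvSumI g 1 (t+1))) (i-1-1) 0
        = pvSumI g 1 (i-1) := by
      rw [PySem.List.pyGetD_map_pyRange_of_nonneg _ (i-1) (i-1-1) 0 (by omega) (by omega),
        show i-1-1+1 = i-1 by omega]
    rw [hacc, hrow (i-1) (by omega) (by omega),
      show pvSumI g 1 (i-1) + g (i-1) = pvSumI g 1 i from (pvSumI_snoc g 1 i (by omega)).symm,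
      show PySem.List.pyRange 0 i 1 = PySem.List.pyRange 0 (i-1) 1 ++ [i-1] from by
        conv_lhs => rw [show i = (i-1)+1 by omega]
        exact PySem.List.pyRange_one_succ_right (by omega),
      List.map_append]
    simp only [List.map_cons, List.map_nil]
    rw [show i-1+1 = i by omega]

theorem pvPrefB_get (row : List Int) (i : Int) (g : Int → Int) (hi : 1 ≤ i)
    (hrow : ∀ j, 1 ≤ j → j < i → PySem.List.pyGetD row j 0 = g j)
    (t : Int) (ht0 : 0 ≤ t) (hti : t < i) :
    PySem.List.pyGetD (pvPrefB row i) t 0 = pvSumI g 1 (t+1) := by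
  rw [pvPrefB_spec row i g hi hrow,
    PySem.List.pyGetD_map_pyRange_of_nonneg _ i t 0 ht0 hti]

-- dicts built from the constraint lists answer exactly set membership
theorem pvHas_link (l : List Int) (x : Int) :
    pvHas (pvToDict l) x = PySem.Set.contains (PySem.Set.ofList l) x := by
  have h1 : pvHas (pvToDict l) x = true ↔ x ∈ l := by
    unfold pvHas pvToDict
    rw [← PySem.Dict.contains_eq_isSome_get?, PySem.Dict.contains_iff_mem_keys,
      PySem.Dict.keys_foldl_insert]
    simp [pysem]
  have h2 : PySem.Set.contains (PySem.Set.ofList l) x = true ↔ x ∈ l := by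
    simp [pysem]
  rw [Bool.eq_iff_iff, h1, h2]

-- B's three freshly built rows are exactly A's new row (0-headed map of pvEntryA)
theorem pvRowCA_shape (row : List Int) (i : Int) (f : Int → Int) (cb : Bool) (s : Int)
    (h2 : 2 ≤ i) (hrow : ∀ j, 1 ≤ j → j < i → PySem.List.pyGetD row j 0 = f j) :
    [0] ++ (PySem.List.pyRange 1 i 1).map
        (fun j => if PySem.List.pyGetD row j 0 = PySem.List.pyGetD row (i-1) 0 then
            PySem.Int.mod ((i - j) * PySem.List.pyGetD row j 0) pvMOD
          else PySem.List.pyGetD (pvPrefB row i) (i-1) 0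
            - PySem.List.pyGetD (pvPrefB row i) (j-1) 0) ++ [0]
      = 0 :: (PySem.List.pyRange 1 (i+1) 1).map (pvEntryA true cb i f s) := by
  rw [PySem.List.pyRange_one_succ_right (show (1:Int) ≤ i by omega), List.map_append]
  have hmap : (PySem.List.pyRange 1 i 1).map
      (fun j => if PySem.List.pyGetD row j 0 = PySem.List.pyGetD row (i-1) 0 then
          PySem.Int.mod ((i - j) * PySem.List.pyGetD row j 0) pvMOD
        else PySem.List.pyGetD (pvPrefB row i) (i-1) 0
          - PySem.List.pyGetD (pvPrefB row i) (j-1) 0)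
      = (PySem.List.pyRange 1 i 1).map (pvEntryA true cb i f s) := by
    apply List.map_congr_left
    intro j hj
    rw [PySem.List.mem_pyRange_one] at hj
    rw [hrow j hj.1 hj.2, hrow (i-1) (by omega) (by omega),
      pvPrefB_get row i f (by omega) hrow (i-1) (by omega) (by omega),
      pvPrefB_get row i f (by omega) hrow (j-1) (by omega) (by omega),
      show i-1+1 = i by omega, show j-1+1 = j by omega, pvMOD_eq,
      pvSumI_split f 1 j i (by omega) (by omega), pvEntryA_CA, if_pos hj.2]
    split_ifs with hcond
    · rfl
    · omega
  rw [hmap]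
  simp [pvEntryA_CA_top]

theorem pvRowCB_shape (row : List Int) (i : Int) (f : Int → Int) (s : Int)
    (h2 : 2 ≤ i) (hrow : ∀ j, 1 ≤ j → j < i → PySem.List.pyGetD row j 0 = f j) :
    [0, 0] ++ (PySem.List.pyRange 2 (i+1) 1).map
        (fun j => if PySem.List.pyGetD row 1 0 = PySem.List.pyGetD row (j-1) 0 then
            PySem.Int.mod ((j - 1) * PySem.List.pyGetD row 1 0) pvMOD
          else PySem.List.pyGetD (pvPrefB row i) (j-1) 0)
      = 0 :: (PySem.List.pyRange 1 (i+1) 1).map (pvEntryA false true i f s) := by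
  rw [PySem.List.pyRange_one_cons (show (1:Int) < i + 1 by omega)]
  simp only [List.map_cons]
  rw [show (1:Int) + 1 = 2 by omega,
    show pvEntryA false true i f s 1 = 0 from by rw [pvEntryA_CB]; simp]
  have hmap : (PySem.List.pyRange 2 (i+1) 1).map
      (fun j => if PySem.List.pyGetD row 1 0 = PySem.List.pyGetD row (j-1) 0 then
          PySem.Int.mod ((j - 1) * PySem.List.pyGetD row 1 0) pvMOD
        else PySem.List.pyGetD (pvPrefB row i) (j-1) 0)
      = (PySem.List.pyRange 2 (i+1) 1).map (pvEntryA false true i f s) := by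
    apply List.map_congr_left
    intro j hj
    rw [PySem.List.mem_pyRange_one] at hj
    rw [hrow 1 le_rfl (by omega), hrow (j-1) (by omega) (by omega),
      pvPrefB_get row i f (by omega) hrow (j-1) (by omega) (by omega),
      show j-1+1 = j by omega, pvMOD_eq, pvEntryA_CB]
    have h1j : (1:Int) < j := by omega
    rw [if_pos h1j]
  rw [hmap]
  rfl

theorem pvRowF_shape (row : List Int) (i : Int) (f : Int → Int) (s : Int)
    (h2 : 2 ≤ i) (hrow : ∀ j, 1 ≤ j → j < i → PySem.List.pyGetD row j 0 = f j)
    (hs : s = pvSumI f 1 i) :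
    [0] ++ List.replicate i.toNat (PySem.Int.mod (PySem.List.pyGetD (pvPrefB row i) (i-1) 0) pvMOD)
      = 0 :: (PySem.List.pyRange 1 (i+1) 1).map (pvEntryA false false i f s) := by
  rw [pvPrefB_get row i f (by omega) hrow (i-1) (by omega) (by omega),
    show i-1+1 = i by omega, pvMOD_eq, ← hs]
  have hlen : (PySem.List.pyRange 1 (i+1) 1).length = i.toNat := by
    rw [PySem.List.length_pyRange_one]
    omega
  have hmap : (PySem.List.pyRange 1 (i+1) 1).map (pvEntryA false false i f s)
      = List.replicate i.toNat (PySem.Int.mod s pvP) := by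
    have he : pvEntryA false false i f s = fun _ => PySem.Int.mod s pvP := by
      funext j
      exact pvEntryA_F i f s j
    rw [he, ← hlen]
    exact List.map_const'
  rw [hmap]
  rfl

-- one unfolding step of each loop
theorem pvForA_step (aD bD : PySem.Dict Int Int) (i : Int) (fuel : Nat)
    (perm : PySem.Dict Int (PySem.Dict Int Int)) (sc : PySem.Dict Int Int) :
    pvForA aD bD i (fuel+1) perm sc =
      (if (pvHas aD i && pvHas bD i) || (pvHas aD i && pvHas aD (i-1)) ||
          (pvHas bD i && pvHas bD (i-1)) then none
       else
        pvForA aD bD (i+1) fuel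
          (PySem.Dict.insert (PySem.Dict.insert perm i PySem.Dict.empty) i
            (pvWhileA (pvHas aD i || pvHas bD (i-1)) (pvHas aD (i-1) || pvHas bD i) i
              (fun j => pvGet (pvRow (PySem.Dict.insert perm i PySem.Dict.empty) (i-1)) j)
              (pvGet (PySem.Dict.insert sc i 0) (i-1)) i i.toNat PySem.Dict.empty 0).1)
          (PySem.Dict.insert (PySem.Dict.insert sc i 0) i
            (pvWhileA (pvHas aD i || pvHas bD (i-1)) (pvHas aD (i-1) || pvHas bD i) i
              (fun j => pvGet (pvRow (PySem.Dict.insert perm i PySem.Dict.empty) (i-1)) j)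
              (pvGet (PySem.Dict.insert sc i 0) (i-1)) i i.toNat PySem.Dict.empty 0).2)) := rfl

theorem pvLoopB_step (aS bS : List Int) (i : Int) (fuel : Nat) (row : List Int) :
    pvLoopB aS bS i (fuel+1) row =
      (if (PySem.Set.contains aS i && PySem.Set.contains bS i) ||
          (PySem.Set.contains aS i && PySem.Set.contains aS (i-1)) ||
          (PySem.Set.contains bS i && PySem.Set.contains bS (i-1)) then none
       else
        pvLoopB aS bS (i+1) fuel
          (if PySem.Set.contains aS i || PySem.Set.contains bS (i-1) then
            [0] ++ (PySem.List.pyRange 1 i 1).map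
              (fun j => if PySem.List.pyGetD row j 0 = PySem.List.pyGetD row (i-1) 0 then
                  PySem.Int.mod ((i - j) * PySem.List.pyGetD row j 0) pvMOD
                else PySem.List.pyGetD (pvPrefB row i) (i-1) 0
                  - PySem.List.pyGetD (pvPrefB row i) (j-1) 0) ++ [0]
          else if PySem.Set.contains aS (i-1) || PySem.Set.contains bS i then
            [0, 0] ++ (PySem.List.pyRange 2 (i+1) 1).map
              (fun j => if PySem.List.pyGetD row 1 0 = PySem.List.pyGetD row (j-1) 0 then
                  PySem.Int.mod ((j - 1) * PySem.List.pyGetD row 1 0) pvMOD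
                else PySem.List.pyGetD (pvPrefB row i) (j-1) 0)
          else
            [0] ++ List.replicate i.toNat
              (PySem.Int.mod (PySem.List.pyGetD (pvPrefB row i) (i-1) 0) pvMOD))) := rfl

-- the coupled run of A's outer loop and B's loop: B's row is exactly A's current row
theorem pvLoopRel (fuel : Nat) :
    ∀ (i : Int) (aD bD : PySem.Dict Int Int) (aS bS : List Int)
      (perm : PySem.Dict Int (PySem.Dict Int Int)) (sc : PySem.Dict Int Int),
    (∀ x, pvHas aD x = PySem.Set.contains aS x) →
    (∀ x, pvHas bD x = PySem.Set.contains bS x) →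
    2 ≤ i →
    pvGet sc (i-1) = pvSumI (fun j => pvGet (pvRow perm (i-1)) j) 1 i →
    (pvForA aD bD i fuel perm sc = none ∧
      pvLoopB aS bS i fuel
        (0 :: (PySem.List.pyRange 1 i 1).map (fun j => pvGet (pvRow perm (i-1)) j)) = none) ∨
    (∃ perm' sc' row', pvForA aD bD i fuel perm sc = some (perm', sc') ∧
      pvLoopB aS bS i fuel
        (0 :: (PySem.List.pyRange 1 i 1).map (fun j => pvGet (pvRow perm (i-1)) j)) = some row' ∧
      pvGet sc' (i + (fuel:Int) - 1) = row'.sum) := by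
  induction fuel with
  | zero =>
    intro i aD bD aS bS perm sc ha hb hi hsum
    right
    refine ⟨perm, sc, _, rfl, rfl, ?_⟩
    rw [pvRowB_sum, show i + ((0:Nat):Int) - 1 = i - 1 by push_cast; ring, hsum]
  | succ fuel ih =>
    intro i aD bD aS bS perm sc ha hb hi hsum
    rw [pvForA_step, pvLoopB_step]
    simp only [ha, hb]
    by_cases hc : ((PySem.Set.contains aS i && PySem.Set.contains bS i) ||
        (PySem.Set.contains aS i && PySem.Set.contains aS (i-1)) ||
        (PySem.Set.contains bS i && PySem.Set.contains bS (i-1))) = true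
    · rw [if_pos hc, if_pos hc]
      exact Or.inl ⟨rfl, rfl⟩
    · rw [if_neg hc, if_neg hc]
      have hperm1 : pvRow (PySem.Dict.insert perm i PySem.Dict.empty) (i-1) = pvRow perm (i-1) := by
        unfold pvRow
        rw [PySem.Dict.get?_insert, if_neg (by omega)]
      have hsc1 : pvGet (PySem.Dict.insert sc i 0) (i-1) = pvGet sc (i-1) := by
        rw [pvGet_insert, if_neg (by omega)]
      simp only [hperm1, hsc1]
      set ca := (PySem.Set.contains aS i || PySem.Set.contains bS (i-1)) with hca
      set cb := (PySem.Set.contains aS (i-1) || PySem.Set.contains bS i) with hcb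
      set F : Int → Int := fun j => pvGet (pvRow perm (i-1)) j with hFdef
      set s : Int := pvGet sc (i-1) with hsdef
      set res := pvWhileA ca cb i F s i i.toNat PySem.Dict.empty 0 with hres
      set rowB := (0 :: (PySem.List.pyRange 1 i 1).map F) with hrowBdef
      have hwget : ∀ q, pvGet res.1 q =
          if 1 ≤ q ∧ q ≤ i then pvEntryA ca cb i F s q else pvGet PySem.Dict.empty q :=
        fun q => pvWhileA_get ca cb i F s i.toNat i PySem.Dict.empty 0 q le_rfl
      have hwsum : res.2 = 0 + pvSumI (pvEntryA ca cb i F s) 1 (i+1) :=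
        pvWhileA_snd ca cb i F s i.toNat i PySem.Dict.empty 0 le_rfl
      have hidx : i + ((fuel+1:Nat):Int) - 1 = (i+1) + (fuel:Int) - 1 := by push_cast; ring
      have hrowget : ∀ j, 1 ≤ j → j < i → PySem.List.pyGetD rowB j 0 = F j := by
        intro j h1 h2
        rw [hrowBdef]
        exact pvRowB_get F i j h1 h2
      -- the next perm's previous row is exactly res.1
      have hpermNew : pvRow (PySem.Dict.insert (PySem.Dict.insert perm i PySem.Dict.empty) i res.1)
          ((i+1)-1) = res.1 := by
        unfold pvRow
        rw [show i+1-1 = i by omega, PySem.Dict.get?_insert, if_pos rfl]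
        rfl
      have hEq : ∀ q, 1 ≤ q → q ≤ i → pvEntryA ca cb i F s q = pvGet res.1 q := by
        intro q h1 h2
        rw [hwget q, if_pos ⟨h1, h2⟩]
      -- generic continuation, given that B's freshly built row is 0 :: map (pvEntryA ca cb i F s)
      have main : ∀ rowNew, rowNew = 0 :: (PySem.List.pyRange 1 (i+1) 1).map (pvEntryA ca cb i F s) →
          (pvForA aD bD (i+1) fuel
              (PySem.Dict.insert (PySem.Dict.insert perm i PySem.Dict.empty) i res.1)
              (PySem.Dict.insert (PySem.Dict.insert sc i 0) i res.2) = none ∧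
            pvLoopB aS bS (i+1) fuel rowNew = none) ∨
          (∃ perm' sc' row',
            pvForA aD bD (i+1) fuel
              (PySem.Dict.insert (PySem.Dict.insert perm i PySem.Dict.empty) i res.1)
              (PySem.Dict.insert (PySem.Dict.insert sc i 0) i res.2) = some (perm', sc') ∧
            pvLoopB aS bS (i+1) fuel rowNew = some row' ∧
            pvGet sc' (i + ((fuel+1:Nat):Int) - 1) = row'.sum) := by
        intro rowNew hrowNew
        have hmapEq : (PySem.List.pyRange 1 (i+1) 1).map (pvEntryA ca cb i F s)
            = (PySem.List.pyRange 1 (i+1) 1).map (fun j => pvGet (pvRow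
                (PySem.Dict.insert (PySem.Dict.insert perm i PySem.Dict.empty) i res.1)
                ((i+1)-1)) j) := by
          apply List.map_congr_left
          intro j hj
          rw [PySem.List.mem_pyRange_one] at hj
          rw [hpermNew]
          exact hEq j hj.1 (by omega)
        rw [hrowNew, hmapEq]
        have hsum'' : pvGet (PySem.Dict.insert (PySem.Dict.insert sc i 0) i res.2) ((i+1)-1) =
            pvSumI (fun j => pvGet (pvRow
              (PySem.Dict.insert (PySem.Dict.insert perm i PySem.Dict.empty) i res.1) ((i+1)-1)) j)
              1 (i+1) := by
          rw [show i+1-1 = i by omega] at hpermNew ⊢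
          rw [pvGet_insert, if_pos rfl, hwsum, zero_add]
          simp only [hpermNew]
          unfold pvSumI
          congr 1
          apply List.map_congr_left
          intro k hk
          rw [PySem.List.mem_pyRange_one] at hk
          exact hEq k hk.1 (by omega)
        have h := ih (i+1) aD bD aS bS _ _ ha hb (by omega) hsum''
        rcases h with ⟨h1, h2⟩ | ⟨p', s', r', h1, h2, h3⟩
        · exact Or.inl ⟨h1, h2⟩
        · refine Or.inr ⟨p', s', r', h1, h2, ?_⟩
          rw [hidx]
          exact h3
      -- the three branches
      by_cases hca' : ca = true
      · rw [if_pos hca']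
        exact main _ (by rw [hca']; exact pvRowCA_shape rowB i F cb s (by omega) hrowget)
      · rw [if_neg hca']
        have hcaf : ca = false := by
          revert hca'
          cases ca <;> simp
        by_cases hcb' : cb = true
        · rw [if_pos hcb']
          exact main _ (by rw [hcaf, hcb']; exact pvRowCB_shape rowB i F s (by omega) hrowget)
        · rw [if_neg hcb']
          have hcbf : cb = false := by
            revert hcb'
            cases cb <;> simp
          refine main _ ?_
          rw [hcaf, hcbf]
          exact pvRowF_shape rowB i F s (by omega) hrowget hsum

theorem pvGet_empty (j : Int) : pvGet PySem.Dict.empty j = 0 := by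
  unfold pvGet
  rw [PySem.Dict.get?_empty]
  rfl

-- ===== VERDICT (by name: the statement is the Claim_ definition above) =====
theorem extremumPermutations_spec : Claim_equal_extremumPermutations := by
  unfold Claim_equal_extremumPermutations
  intro n a b hdom hpre
  have hn1 : 1 ≤ n := hpre
  unfold Spec_extremumPermutations
  have hA : extremumPermutations n a b = (match pvForA (pvToDict a) (pvToDict b) 2 (n-1).toNat
      (PySem.Dict.insert PySem.Dict.empty 1 (PySem.Dict.insert PySem.Dict.empty 1 1))
      (PySem.Dict.insert PySem.Dict.empty 1 1) with
    | none => 0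
    | some (_, sc) => PySem.Int.mod (pvGet sc n) pvP) := rfl
  have hB : extremumPermutations_alt n a b = (match pvLoopB (PySem.Set.ofList a)
      (PySem.Set.ofList b) 2 (n-1).toNat [0, 1] with
    | none => 0
    | some row => PySem.Int.mod row.sum pvMOD) := rfl
  rw [hA, hB]
  have hf0 : ∀ j : Int, pvGet (pvRow (PySem.Dict.insert PySem.Dict.empty 1
      (PySem.Dict.insert PySem.Dict.empty 1 1)) ((2:Int)-1)) j
      = if j = 1 then 1 else 0 := by
    intro j
    unfold pvRow
    rw [show (2:Int)-1 = 1 by omega, PySem.Dict.get?_insert, if_pos rfl]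
    show pvGet (PySem.Dict.insert PySem.Dict.empty 1 1) j = _
    rw [pvGet_insert, pvGet_empty]
  have hsum0 : pvGet (PySem.Dict.insert PySem.Dict.empty 1 1) ((2:Int)-1)
      = pvSumI (fun j => pvGet (pvRow (PySem.Dict.insert PySem.Dict.empty 1
        (PySem.Dict.insert PySem.Dict.empty 1 1)) ((2:Int)-1)) j) 1 2 := by
    rw [pvSumI_cons _ 1 2 (by omega), pvSumI_nil _ (1+1) 2 (by omega), pvGet_insert,
      if_pos (show (2:Int)-1 = 1 by omega)]
    have hf1 := hf0 1
    norm_num at hf1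
    simp [hf1]
  have h := pvLoopRel ((n-1).toNat) 2 (pvToDict a) (pvToDict b)
    (PySem.Set.ofList a) (PySem.Set.ofList b)
    (PySem.Dict.insert PySem.Dict.empty 1 (PySem.Dict.insert PySem.Dict.empty 1 1))
    (PySem.Dict.insert PySem.Dict.empty 1 1)
    (fun x => pvHas_link a x) (fun x => pvHas_link b x) (by omega) hsum0
  have hrowinit : (0 : Int) :: (PySem.List.pyRange 1 2 1).map
      (fun j => pvGet (pvRow (PySem.Dict.insert PySem.Dict.empty 1
        (PySem.Dict.insert PySem.Dict.empty 1 1)) ((2:Int)-1)) j) = [0, 1] := by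
    rw [show PySem.List.pyRange (1:Int) 2 1 = [1] from by decide]
    simp only [List.map_cons, List.map_nil]
    rw [hf0 1]
    norm_num
  rw [hrowinit] at h
  rcases h with ⟨h1, h2⟩ | ⟨p', s', r', h1, h2, h3⟩
  · rw [h1, h2]
  · rw [h1, h2]
    show PySem.Int.mod (pvGet s' n) pvP = PySem.Int.mod r'.sum pvMOD
    rw [show (2:Int) + ((n-1).toNat:Int) - 1 = n by omega] at h3
    rw [pvMOD_eq, h3]
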